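-- pv_equiv track=rewrite | github.com/coingraham/adventofcode | 2024/day7-multiprocess.py | find_operands
-- ===== SOURCE A (Python) =====
-- def find_operands(digits, answer, target):
--     # Base condition
--     if not digits:
--         return answer == target
--
--     # Get the next digit
--     next_digit = digits.pop(0)
--
--     # Try adding this next digit
--     if find_operands(digits, answer + next_digit, target):
--         return True
--
--     # Try multiplying this next digit
--     if find_operands(digits, answer * next_digit, target):
--         return True
--
--     # Nothing worked, put it back
--     digits.insert(0, next_digit)
--     return False
-- ===== SOURCE B (Python) =====
-- def find_operands(digits, answer, target):
--     # Return-value equivalence only: A empties `digits` on success (and restores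
--     # it on failure); B never mutates `digits`.
--     results = {answer}
--     for d in digits:
--         results = {r + d for r in results} | {r * d for r in results}
--     return target in results
-- ===== Notes on version B (the rewrite author's own statement) =====
-- stated objective: simpler
-- what changed: Replaced the branching recursion with pop/insert backtracking by a single left-to-right pass maintaining the set of all reachable intermediate values; B does not mutate digits (A empties it on success), return-value equivalence only.
import Mathlib
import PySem

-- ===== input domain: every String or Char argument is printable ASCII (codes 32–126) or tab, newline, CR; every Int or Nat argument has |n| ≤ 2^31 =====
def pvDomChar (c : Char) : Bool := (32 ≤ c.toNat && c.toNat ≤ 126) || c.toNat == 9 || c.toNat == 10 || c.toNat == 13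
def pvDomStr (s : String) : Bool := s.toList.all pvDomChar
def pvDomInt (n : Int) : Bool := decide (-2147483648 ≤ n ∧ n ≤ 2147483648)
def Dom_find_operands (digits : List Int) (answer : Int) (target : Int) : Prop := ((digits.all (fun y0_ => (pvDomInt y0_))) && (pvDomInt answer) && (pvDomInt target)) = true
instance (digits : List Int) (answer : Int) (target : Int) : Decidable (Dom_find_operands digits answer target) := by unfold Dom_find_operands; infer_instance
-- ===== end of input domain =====

-- B replaces A's branching backtracking recursion by one pass over the digits
-- maintaining the set of reachable intermediate values (return-value equivalence
-- only: A empties the mutable `digits` argument on success, B never mutates it).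

-- ===== PORT A =====
-- A's backtracking pop/insert only restores the list; on the return value it is
-- the recursion on the head:  [] ↦ answer == target;  d::ds ↦ try +, then *.
def find_operands (digits : List Int) (answer : Int) (target : Int) : Bool :=
  match digits with
  | [] => answer == target
  | next_digit :: rest =>
    if find_operands rest (answer + next_digit) target then true
    else if find_operands rest (answer * next_digit) target then true
    else false

-- ===== PORT B =====
def pvStep (rs : PySem.Set Int) (d : Int) : PySem.Set Int :=
  PySem.Set.union (PySem.Set.ofList (rs.map (· + d))) (rs.map (· * d))

def find_operands_alt (digits : List Int) (answer : Int) (target : Int) : Bool :=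
  let results := digits.foldl pvStep (PySem.Set.ofList [answer])
  PySem.Set.contains results target

-- ===== PRECONDITION & SPEC =====
def Spec_find_operands (digits : List Int) (answer : Int) (target : Int) (out : Bool) : Prop := out = find_operands_alt digits answer target
instance (digits : List Int) (answer : Int) (target : Int) (out : Bool) : Decidable (Spec_find_operands digits answer target out) := by unfold Spec_find_operands; infer_instance

-- ===== CLAIM (what is proved, stated in full; the proofs are below) =====
def Claim_equal_find_operands : Prop := ∀ (digits : List Int) (answer : Int) (target : Int), Dom_find_operands digits answer target → Spec_find_operands digits answer target (find_operands digits answer target)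

-- ===== LEMMAS AND PROOFS =====

theorem mem_pvStep (rs : List Int) (d x : Int) :
    x ∈ pvStep rs d ↔ ∃ r ∈ rs, x = r + d ∨ x = r * d := by
  simp only [pvStep, PySem.Set.mem_union, PySem.Set.mem_ofList, List.mem_map]
  constructor
  · rintro (⟨r, hr, rfl⟩ | ⟨r, hr, rfl⟩) <;> exact ⟨r, hr, by simp⟩
  · rintro ⟨r, hr, rfl | rfl⟩
    · exact Or.inl ⟨r, hr, rfl⟩
    · exact Or.inr ⟨r, hr, rfl⟩

theorem find_operands_cons (d : Int) (ds : List Int) (a t : Int) :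
    find_operands (d :: ds) a t =
      (find_operands ds (a + d) t || find_operands ds (a * d) t) := by
  simp only [find_operands]
  by_cases h1 : find_operands ds (a + d) t <;>
    by_cases h2 : find_operands ds (a * d) t <;> simp [h1, h2]

theorem foldl_pvStep_mem (ds : List Int) (t : Int) :
    ∀ (S : List Int),
      (t ∈ ds.foldl pvStep S ↔ ∃ r ∈ S, find_operands ds r t = true) := by
  induction ds with
  | nil =>
    intro S
    simp only [List.foldl_nil, find_operands, beq_iff_eq]
    constructor
    · exact fun h => ⟨t, h, rfl⟩
    · rintro ⟨r, hr, rfl⟩; exact hr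
  | cons d ds ih =>
    intro S
    rw [List.foldl_cons, ih]
    constructor
    · rintro ⟨r, hr, hfind⟩
      rcases (mem_pvStep S d r).mp hr with ⟨s, hs, rfl | rfl⟩
      · exact ⟨s, hs, by rw [find_operands_cons]; simp [hfind]⟩
      · exact ⟨s, hs, by rw [find_operands_cons]; simp [hfind]⟩
    · rintro ⟨s, hs, hfind⟩
      rw [find_operands_cons, Bool.or_eq_true] at hfind
      rcases hfind with h | h
      · exact ⟨s + d, (mem_pvStep S d _).mpr ⟨s, hs, Or.inl rfl⟩, h⟩
      · exact ⟨s * d, (mem_pvStep S d _).mpr ⟨s, hs, Or.inr rfl⟩, h⟩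

-- ===== VERDICT (by name: the statement is the Claim_ definition above) =====
theorem find_operands_spec : Claim_equal_find_operands := by
  intro digits answer target _
  unfold Spec_find_operands find_operands_alt
  have key : target ∈ digits.foldl pvStep (PySem.Set.ofList [answer]) ↔
      find_operands digits answer target = true := by
    rw [foldl_pvStep_mem]
    simp [PySem.Set.mem_ofList]
  rw [Bool.eq_iff_iff, ← key]
  simp [PySem.Set.contains_eq_listContains]
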